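-- pv_equiv track=rewrite | github.com/jacobmorrin/launchschool_py110 | small_problems/practice/problem7.py | pairs
-- ===== SOURCE A (Python) =====
-- def pairs(lst):
--     counts = {}
--
--     for num in lst:
--         counts[num] = counts.get(num, 0) + 1
--
--     pairs = 0
--
--     for value in counts.values():
--         pairs += value // 2
--
--     return pairs
-- ===== SOURCE B (Python) =====
-- def pairs(lst):
--     seen = set()
--     total = 0
--     for num in lst:
--         if num in seen:
--             seen.discard(num)
--             total += 1
--         else:
--             seen.add(num)
--     return total
-- ===== Notes on version B (the rewrite author's own statement) =====
-- stated objective: idiomatic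
-- what changed: Single pass maintaining a set of elements seen an odd number of times (remove-and-count on a repeat, add otherwise), instead of building a full count dict and then summing value//2 over it in a second loop.
import Mathlib
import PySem

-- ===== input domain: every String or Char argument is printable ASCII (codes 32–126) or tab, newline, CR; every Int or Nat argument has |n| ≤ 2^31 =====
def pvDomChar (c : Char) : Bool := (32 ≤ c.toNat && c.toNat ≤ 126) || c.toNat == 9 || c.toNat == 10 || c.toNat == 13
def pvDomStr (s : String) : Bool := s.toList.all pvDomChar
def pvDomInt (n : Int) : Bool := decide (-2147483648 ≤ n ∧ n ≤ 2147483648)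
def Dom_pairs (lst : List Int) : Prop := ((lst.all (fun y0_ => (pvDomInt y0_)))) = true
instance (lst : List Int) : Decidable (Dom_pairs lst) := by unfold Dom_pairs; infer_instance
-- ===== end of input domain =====

-- B replaces A's count-dict + second summing loop by one pass keeping a set of
-- elements seen an odd number of times (idiomatic running-parity formulation).


-- ===== PORT A =====
def pairs (lst : List Int) : Int :=
  let counts : PySem.Dict Int Int :=
    lst.foldl (fun d num => d.insert num (d.getD num 0 + 1)) PySem.Dict.empty
  counts.values.foldl (fun p value => p + PySem.Int.floordiv value 2) 0

-- ===== PORT B =====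
def pairsAltStep (st : PySem.Set Int × Int) (num : Int) : PySem.Set Int × Int :=
  if st.1.contains num then (st.1.discard num, st.2 + 1) else (st.1.add num, st.2)

def pairs_alt (lst : List Int) : Int :=
  (lst.foldl pairsAltStep (PySem.Set.empty, 0)).2

-- ===== PRECONDITION & SPEC =====
def Spec_pairs (lst : List Int) (out : Int) : Prop := out = pairs_alt lst
instance (lst : List Int) (out : Int) : Decidable (Spec_pairs lst out) := by unfold Spec_pairs; infer_instance

-- ===== CLAIM (what is proved, stated in full; the proofs are below) =====
def Claim_equal_pairs : Prop := ∀ (lst : List Int), Dom_pairs lst → Spec_pairs lst (pairs lst)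

-- ===== LEMMAS AND PROOFS =====

-- the common reference value: sum over the distinct elements of half of each count
def pairSum (l : List Int) : Int :=
  ((PySem.Set.ofList l).map (fun k => ((l.count k / 2 : Nat) : Int))).sum

theorem pairs_eq_pairSum (lst : List Int) : pairs lst = pairSum lst := by
  unfold pairs pairSum
  rw [PySem.Dict.foldl_insert_getD_add_one_eq_counter]
  simp only [PySem.Dict.values, PySem.Dict.items_counter, List.map_map,
    PySem.List.foldl_add, List.map_map]
  simp [Function.comp_def]

-- sum over a Nodup list of a function changed only at one member x of the list
theorem sum_map_update (t : List Int) (x : Int) (f g : Int → Int)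
    (hx : x ∈ t) (hnd : t.Nodup) (hfg : ∀ k ∈ t, k ≠ x → g k = f k) :
    (t.map g).sum = (t.map f).sum + (g x - f x) := by
  induction t with
  | nil => cases hx
  | cons a t ih =>
    rcases List.mem_cons.mp hx with rfl | hx'
    · have : ∀ k ∈ t, g k = f k := by
        intro k hk
        exact hfg k (List.mem_cons_of_mem _ hk) (fun h => (List.nodup_cons.mp hnd).1 (h ▸ hk))
      simp [List.map_congr_left this]; ring
    · have ha : a ≠ x := fun h => (List.nodup_cons.mp hnd).1 (h ▸ hx')
      simp only [List.map_cons, List.sum_cons,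
        ih hx' (List.nodup_cons.mp hnd).2 (fun k hk => hfg k (List.mem_cons_of_mem _ hk)),
        hfg a (List.mem_cons_self) ha]
      ring

theorem ofList_append_singleton (l : List Int) (x : Int) :
    PySem.Set.ofList (l ++ [x]) = (PySem.Set.ofList l).add x := by
  simp [PySem.Set.ofList, List.foldl_append]

theorem add_of_mem (s : PySem.Set Int) (x : Int) (h : x ∈ s) : s.add x = s := by
  simp [PySem.Set.add, h]

theorem add_of_not_mem (s : PySem.Set Int) (x : Int) (h : x ∉ s) : s.add x = s ++ [x] := by
  simp [PySem.Set.add, h]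

-- the loop invariant: the set holds exactly the odd-count elements (without duplicates)
-- and the counter equals pairSum of the processed prefix
theorem loop_inv (l : List Int) :
    (l.foldl pairsAltStep (PySem.Set.empty, 0)).1.Nodup ∧
    (∀ k, k ∈ (l.foldl pairsAltStep (PySem.Set.empty, 0)).1 ↔ l.count k % 2 = 1) ∧
    (l.foldl pairsAltStep (PySem.Set.empty, 0)).2 = pairSum l := by
  induction l using List.reverseRecOn with
  | nil => simp [PySem.Set.empty, pairSum, PySem.Set.ofList]
  | append_singleton l x ih =>
    obtain ⟨hnd, hmem, hsum⟩ := ih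
    rw [List.foldl_append]
    set st := l.foldl pairsAltStep (PySem.Set.empty, 0) with hst
    have hcnt : ∀ k : Int, (l ++ [x]).count k = l.count k + if k = x then 1 else 0 := by
      intro k; simp [List.count_append, List.count_singleton', eq_comm]
    rw [show List.foldl pairsAltStep st [x] = pairsAltStep st x from rfl]
    by_cases hc : st.1.contains x = true
    · -- x has been seen an odd number of times: remove it, count a pair
      have hxodd : l.count x % 2 = 1 := (hmem x).mp ((PySem.Set.contains_iff _ _).mp hc)
      have hxl : x ∈ l := by
        by_contra h; rw [List.count_eq_zero_of_not_mem h] at hxodd; omega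
      have hxofl : x ∈ PySem.Set.ofList l := (PySem.Set.mem_ofList l x).mpr hxl
      simp only [pairsAltStep, hc, if_pos]
      refine ⟨List.Nodup.filter _ hnd, ?_, ?_⟩
      · intro k
        have hd : k ∈ st.1.discard x ↔ (k ∈ st.1 ∧ ¬ k = x) := by
          simp [PySem.Set.discard, List.mem_filter]
        rw [hd, hcnt k]
        by_cases hk : k = x
        · subst hk
          constructor
          · rintro ⟨-, hne⟩; exact absurd rfl hne
          · intro h; exfalso; simp at h; omega
        · rw [if_neg hk, add_zero, hmem k]
          simp [hk]
      · rw [hsum]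
        unfold pairSum
        rw [ofList_append_singleton, add_of_mem _ _ hxofl,
          sum_map_update (PySem.Set.ofList l) x
            (fun k => ((l.count k / 2 : Nat) : Int))
            (fun k => (((l ++ [x]).count k / 2 : Nat) : Int))
            hxofl (PySem.Set.nodup_ofList l)
            (fun k _ hk => by simp only [hcnt k, if_neg hk, add_zero])]
        have h2 : (l ++ [x]).count x = l.count x + 1 := by rw [hcnt x]; simp
        have h3 : (l.count x + 1) / 2 = l.count x / 2 + 1 := by omega
        rw [h2, h3]; push_cast; ring
    · -- x has been seen an even number of times: add it to the set
      have hxnot : x ∉ st.1 := fun h => hc ((PySem.Set.contains_iff _ _).mpr h)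
      have hxeven : l.count x % 2 = 0 := by
        have h1 : ¬ (l.count x % 2 = 1) := fun h => hxnot ((hmem x).mpr h)
        omega
      simp only [pairsAltStep, hc, if_neg, Bool.false_eq_true, not_false_iff]
      rw [add_of_not_mem _ _ hxnot]
      refine ⟨?_, ?_, ?_⟩
      · rw [List.nodup_append]
        refine ⟨hnd, List.nodup_singleton x, ?_⟩
        intro a ha b hb hab
        rw [List.mem_singleton] at hb
        exact hxnot ((hab.trans hb) ▸ ha)
      · intro k
        rw [List.mem_append, List.mem_singleton, hcnt k]
        by_cases hk : k = x
        · subst hk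
          constructor
          · intro _; simp; omega
          · intro _; right; rfl
        · rw [if_neg hk, add_zero, hmem k]
          simp [hk]
      · rw [hsum]
        unfold pairSum
        rw [ofList_append_singleton]
        by_cases hxl : x ∈ l
        · have hxofl : x ∈ PySem.Set.ofList l := (PySem.Set.mem_ofList l x).mpr hxl
          rw [add_of_mem _ _ hxofl,
            sum_map_update (PySem.Set.ofList l) x
              (fun k => ((l.count k / 2 : Nat) : Int))
              (fun k => (((l ++ [x]).count k / 2 : Nat) : Int))
              hxofl (PySem.Set.nodup_ofList l)
              (fun k _ hk => by simp only [hcnt k, if_neg hk, add_zero])]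
          have h2 : (l ++ [x]).count x = l.count x + 1 := by rw [hcnt x]; simp
          have h3 : (l.count x + 1) / 2 = l.count x / 2 := by omega
          rw [h2, h3]; ring
        · have hxofl : x ∉ PySem.Set.ofList l := fun h => hxl ((PySem.Set.mem_ofList l x).mp h)
          rw [add_of_not_mem _ _ hxofl, List.map_append, List.sum_append]
          have hcong : ∀ k ∈ PySem.Set.ofList l,
              (fun k => (((l ++ [x]).count k / 2 : Nat) : Int)) k
                = (fun k => ((l.count k / 2 : Nat) : Int)) k := by
            intro k hk
            have hkx : ¬ k = x := fun h => hxofl (h ▸ hk)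
            simp only [hcnt k, if_neg hkx, add_zero]
          rw [List.map_congr_left hcong]
          have hx0 : l.count x = 0 := List.count_eq_zero_of_not_mem hxl
          simp [hx0]

theorem pairs_alt_eq_pairSum (lst : List Int) : pairs_alt lst = pairSum lst :=
  (loop_inv lst).2.2

-- ===== VERDICT (by name: the statement is the Claim_ definition above) =====
theorem pairs_spec : Claim_equal_pairs := by
  intro lst _
  unfold Spec_pairs
  rw [pairs_eq_pairSum, pairs_alt_eq_pairSum]
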